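-- pv_equiv track=rewrite | github.com/Aksh4y2604/AOC-2023 | d2.py | min_ball_count
-- ===== SOURCE A (Python) =====
-- def min_ball_count(game_data):
--     r, g, b = 0, 0, 0
--     for game in game_data:
--         red, blue, green = game
--         r = max(r, red)
--         b = max(b, blue)
--         g = max(g, green)
--     return r*g*b
-- ===== SOURCE B (Python) =====
-- def min_ball_count(game_data):
--     rs = sorted([0] + [t[0] for t in game_data])
--     bs = sorted([0] + [t[1] for t in game_data])
--     gs = sorted([0] + [t[2] for t in game_data])
--     return rs[-1] * gs[-1] * bs[-1]
-- ===== Notes on version B (the rewrite author's own statement) =====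
-- stated objective: alternative
-- what changed: Instead of A's single running-max loop, B builds each color's value list with a sentinel 0 prepended, sorts it, and takes the last (largest) element; the product of the three sorted-list maxima equals A's interleaved fold.
import Mathlib
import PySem

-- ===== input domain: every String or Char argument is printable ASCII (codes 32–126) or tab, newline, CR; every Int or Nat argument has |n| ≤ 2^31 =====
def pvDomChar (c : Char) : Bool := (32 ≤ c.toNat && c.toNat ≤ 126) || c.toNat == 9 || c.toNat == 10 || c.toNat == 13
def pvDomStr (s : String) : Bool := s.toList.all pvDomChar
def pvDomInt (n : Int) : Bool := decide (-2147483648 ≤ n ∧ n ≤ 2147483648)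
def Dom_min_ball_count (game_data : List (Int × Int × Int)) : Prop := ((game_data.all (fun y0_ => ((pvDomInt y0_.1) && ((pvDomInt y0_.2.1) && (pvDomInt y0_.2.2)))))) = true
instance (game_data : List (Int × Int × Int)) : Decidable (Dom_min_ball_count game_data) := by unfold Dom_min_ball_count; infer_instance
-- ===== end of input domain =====

-- B replaces A's single running-max loop by sorting each color's values (with a sentinel 0)
-- and taking the last element of each sorted list; objective: alternative algorithm.

-- ===== PORT A =====
def min_ball_count (game_data : List (Int × Int × Int)) : Int :=
  let s := game_data.foldl
    (fun (acc : Int × Int × Int) game =>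
      let red := game.1; let blue := game.2.1; let green := game.2.2
      (max acc.1 red, max acc.2.1 blue, max acc.2.2 green))
    (0, 0, 0)
  s.1 * s.2.2 * s.2.1

-- ===== PORT B =====
-- Each sorted list contains the sentinel 0, so it is nonempty and Python's rs[-1]
-- (PySem.List.pyGet? _ (-1)) is always `some`; the `.getD 0` default is unreachable.
def min_ball_count_alt (game_data : List (Int × Int × Int)) : Int :=
  let rs := PySem.List.sorted ((0 : Int) :: game_data.map (fun t => t.1)) (fun x => x) false
  let bs := PySem.List.sorted ((0 : Int) :: game_data.map (fun t => t.2.1)) (fun x => x) false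
  let gs := PySem.List.sorted ((0 : Int) :: game_data.map (fun t => t.2.2)) (fun x => x) false
  ((PySem.List.pyGet? rs (-1)).getD 0) * ((PySem.List.pyGet? gs (-1)).getD 0) *
    ((PySem.List.pyGet? bs (-1)).getD 0)

-- ===== PRECONDITION & SPEC =====
def Spec_min_ball_count (game_data : List (Int × Int × Int)) (out : Int) : Prop := out = min_ball_count_alt game_data
instance (game_data : List (Int × Int × Int)) (out : Int) : Decidable (Spec_min_ball_count game_data out) := by unfold Spec_min_ball_count; infer_instance

-- ===== CLAIM (what is proved, stated in full; the proofs are below) =====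
def Claim_equal_min_ball_count : Prop := ∀ (game_data : List (Int × Int × Int)), Dom_min_ball_count game_data → Spec_min_ball_count game_data (min_ball_count game_data)

-- ===== LEMMAS AND PROOFS =====

theorem foldl_max_mem (l : List Int) (a : Int) : List.foldl max a l ∈ a :: l := by
  induction l generalizing a with
  | nil => simp
  | cons h t ih =>
    simp only [List.foldl]
    rcases List.mem_cons.mp (ih (max a h)) with hm | hm
    · rcases max_choice a h with hc | hc
      · rw [hc] at hm ⊢; simp [hm]
      · rw [hc] at hm ⊢; simp [hm]
    · simp [hm]

theorem le_getLast?_of_pairwise (s : List Int) (L : Int) :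
    s.Pairwise (fun a b => a ≤ b) → s.getLast? = some L → ∀ x ∈ s, x ≤ L := by
  induction s with
  | nil => intro _ _ x hx; simp at hx
  | cons a t ih =>
    intro hp hL x hx
    cases t with
    | nil => simp at hL hx; omega
    | cons b t' =>
      rw [List.getLast?_cons_cons] at hL
      have htail := ih (List.pairwise_cons.mp hp).2 hL
      rcases List.mem_cons.mp hx with rfl | hx'
      · have hab : x ≤ b := (List.pairwise_cons.mp hp).1 b (by simp)
        have hbL : b ≤ L := htail b (by simp)
        omega
      · exact htail x hx'

-- last of sorted(0 :: ys) = foldl max 0 ys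
theorem last_sorted_eq_foldl_max (ys : List Int) :
    ((PySem.List.sorted ((0 : Int) :: ys) (fun x => x) false).getLast?).getD 0
      = List.foldl max 0 ys := by
  set s := PySem.List.sorted ((0 : Int) :: ys) (fun x => x) false with hs
  set m := List.foldl max 0 ys with hm
  have hsne : s ≠ [] := by
    intro h
    exact (List.cons_ne_nil _ _) ((PySem.List.sorted_eq_nil_iff _ _ _).mp h)
  obtain ⟨L, hL⟩ := List.getLast?_isSome.mpr hsne |> Option.isSome_iff_exists.mp
  have hp : s.Pairwise (fun a b : Int => a ≤ b) := by
    simpa using PySem.List.sorted_pairwise ((0 : Int) :: ys) (fun x => x)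
  have hmem_m : m ∈ s := by
    rw [hs, PySem.List.mem_sorted]
    exact foldl_max_mem ys 0
  have hmL : m ≤ L := le_getLast?_of_pairwise s L hp hL m hmem_m
  have hLmem : L ∈ (0 : Int) :: ys := by
    have : L ∈ s := List.mem_of_getLast? hL
    rwa [hs, PySem.List.mem_sorted] at this
  have hLm : L ≤ m := by
    rcases List.mem_cons.mp hLmem with rfl | hL'
    · exact (PySem.List.le_foldl_max ys 0).1
    · exact (PySem.List.le_foldl_max ys 0).2 L hL'
  rw [hL]
  simp only [Option.getD_some]
  omega

theorem loop_split (l : List (Int × Int × Int)) (r b g : Int) :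
    l.foldl
      (fun (acc : Int × Int × Int) game =>
        (max acc.1 game.1, max acc.2.1 game.2.1, max acc.2.2 game.2.2))
      (r, b, g)
    = (List.foldl max r (l.map (fun game => game.1)),
       List.foldl max b (l.map (fun game => game.2.1)),
       List.foldl max g (l.map (fun game => game.2.2))) := by
  induction l generalizing r b g with
  | nil => rfl
  | cons h t ih => simpa using ih (max r h.1) (max b h.2.1) (max g h.2.2)

-- ===== VERDICT (by name: the statement is the Claim_ definition above) =====
theorem min_ball_count_spec : Claim_equal_min_ball_count := by
  intro gd _
  unfold Spec_min_ball_count min_ball_count min_ball_count_alt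
  simp only [loop_split, PySem.List.pyGet?_neg_one, last_sorted_eq_foldl_max]
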